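-- pv_equiv track=rewrite | github.com/wlsgusjjn/EAX-TSP | EAX_TSP.py | inter_conn
-- ===== SOURCE A (Python) =====
-- def inter_conn(sub,li,chk,flg):
--     j = 0
--     while(j < len(li)):
--         temp = -1
--         a = -1
--         b = -1
--         if flg == 1 or flg == 2:
--             temp = len(sub)-1
--             a = 0
--             b = 1
--         elif flg == -1 or flg == -2:
--             temp = 0
--             a = 1
--             b = 0
--
--         if sub[temp] == li[j][a]:
--             if chk[j] == 0 or chk[j] == -1:
--                 if flg == 1 or flg == 2:
--                     sub.append(li[j][b])
--                 elif flg == -1 or flg == -2: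
--                     sub.insert(0,li[j][b])
--                 chk[j] = 1
--                 j = 0
--             else:
--                 j += 1
--
--         elif sub[temp] == li[j][b]:
--             if flg == 2 or flg == -2:
--                 if chk[j] == 0 or chk[j] == -1:
--                     if flg == 2:
--                         sub.append(li[j][a])
--                     elif flg == -2:
--                         sub.insert(0,li[j][a])
--                     chk[j] = 1
--                     j = 0
--                 else:
--                     j += 1
--             else:
--                 if chk[j] == -1:
--                     if flg == 1:
--                         sub.append(li[j][a])
--                     elif flg == -1:
--                         sub.insert(0,li[j][a])
--                     chk[j] = 1
--                     j = 0
--                 else: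
--                     j += 1
--
--         else:
--             j += 1
--
--     return sub, li, chk
-- ===== SOURCE B (Python) =====
-- # Same return value and same in-place mutation of sub/chk as A, but organised
-- # differently: the edges are indexed once by endpoint value in a dict, and each
-- # step scans only the candidates of the current endpoint instead of restarting
-- # a scan of the whole edge list.
-- def inter_conn(sub, li, chk, flg):
--     if not li:
--         return sub, li, chk
--     if flg == 1 or flg == 2:
--         a, b = 0, 1
--     elif flg == -1 or flg == -2:
--         a, b = 1, 0
--     else:
--         a, b = -1, -1
--     cand = {}
--     for j in range(len(li)):
--         e = li[j]
--         cand.setdefault(e[a], []).append(j)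
--         if e[b] != e[a]:
--             cand.setdefault(e[b], []).append(j)
--     while True:
--         if flg == 1 or flg == 2:
--             v = sub[len(sub) - 1]
--         elif flg == -1 or flg == -2:
--             v = sub[0]
--         else:
--             v = sub[-1]
--         hit = None
--         for j in cand.get(v, []):
--             e = li[j]
--             if e[a] == v:
--                 if chk[j] == 0 or chk[j] == -1:
--                     hit = (j, e[b])
--                     break
--             else:
--                 if (chk[j] == 0 or chk[j] == -1) if (flg == 2 or flg == -2) else chk[j] == -1:
--                     hit = (j, e[a])
--                     break
--         if hit is None:
--             break
--         j, w = hit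
--         chk[j] = 1
--         if flg == 1 or flg == 2:
--             sub.append(w)
--         elif flg == -1 or flg == -2:
--             sub.insert(0, w)
--     return sub, li, chk
-- ===== Notes on version B (the rewrite author's own statement) =====
-- stated objective: alternative
-- what changed: B indexes the edges once in a dict from endpoint value to the ascending list of edge indices touching it, then repeatedly extends the path by scanning only the candidates of the current endpoint, instead of A's restart-from-index-0 rescans of the whole edge list after every extension.
-- outside the precondition, e.g. on inter_conn([5], [[5]], [1], 1): A returns ([5], [[5]], [1]), B raises IndexError; on inter_conn([0, 5], [[0, 9]], [], 1): A returns ([0, 5], [[0, 9]], []), B returns ([0, 5], [[0, 9]], [])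
import Mathlib
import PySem

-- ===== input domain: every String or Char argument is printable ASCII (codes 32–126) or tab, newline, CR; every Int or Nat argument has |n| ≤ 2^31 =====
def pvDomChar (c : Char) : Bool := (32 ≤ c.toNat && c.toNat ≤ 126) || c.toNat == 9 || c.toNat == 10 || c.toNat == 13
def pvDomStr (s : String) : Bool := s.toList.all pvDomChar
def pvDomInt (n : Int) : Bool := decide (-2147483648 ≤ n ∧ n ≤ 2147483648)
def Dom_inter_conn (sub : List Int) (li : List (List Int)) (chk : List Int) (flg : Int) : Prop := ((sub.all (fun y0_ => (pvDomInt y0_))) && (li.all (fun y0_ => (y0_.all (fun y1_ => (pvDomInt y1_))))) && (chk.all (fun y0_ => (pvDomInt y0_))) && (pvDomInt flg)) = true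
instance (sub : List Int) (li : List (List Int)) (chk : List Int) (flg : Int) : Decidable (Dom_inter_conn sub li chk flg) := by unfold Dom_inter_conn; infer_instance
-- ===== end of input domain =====

-- B re-implements A's greedy path extension differently (objective: alternative): a dict built
-- once maps each endpoint value to its candidate edge indices, replacing A's restart-from-0
-- rescans of the whole edge list. Both Pythons mutate sub/chk in place identically; the
-- equivalence here is about the returned triple. Out-of-range indexing (excluded by Pre_) is
-- totalised in both ports with the same defaults (rows/endpoint default 0, chk default 1).

-- eligibility predicate on a chk cell: chk[j] == 0 or chk[j] == -1 (used by both termination measures)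
def pvChkP : Int → Bool := fun c => c == 0 || c == -1

-- cited by the ports' decreasing_by: marking an eligible chk cell used strictly shrinks the count
theorem pvCountP_set_lt (chk : List Int) (j : Nat) (h : pvChkP (chk.getD j 1) = true) :
    (chk.set j 1).countP pvChkP < chk.countP pvChkP := by
  induction chk generalizing j with
  | nil => simp [pvChkP] at h
  | cons c tl ih =>
    cases j with
    | zero =>
      simp only [List.getD_cons_zero] at h
      have hc : c = 0 ∨ c = -1 := by simpa [pvChkP] using h
      simp [List.countP_cons, pvChkP]
      rcases hc with rfl | rfl <;> simp
    | succ j =>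
      simp only [List.getD_cons_succ] at h
      have := ih j h
      simp only [List.set_cons_succ, List.countP_cons]
      omega

-- ===== PORT A =====
-- A's while loop: j scans li; on a successful extension chk[j] := 1 and j restarts at 0.
def pvALoop (flg : Int) (li : List (List Int)) (sub : List Int) (chk : List Int) (j : Nat) :
    List Int × List (List Int) × List Int :=
  if hj : j < li.length then
    -- temp, a, b as Python computes them from flg
    let tab : Int × Int × Int :=
      if flg == 1 || flg == 2 then ((sub.length : Int) - 1, 0, 1)
      else if flg == -1 || flg == -2 then (0, 1, 0)
      else (-1, -1, -1)
    let row := li.getD j []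
    let sv := PySem.List.pyGetD sub tab.1 0       -- sub[temp]
    let ra := PySem.List.pyGetD row tab.2.1 0     -- li[j][a]
    let rb := PySem.List.pyGetD row tab.2.2 0     -- li[j][b]
    if sv == ra then
      if chk.getD j 1 == 0 || chk.getD j 1 == -1 then
        let sub' := if flg == 1 || flg == 2 then sub ++ [rb]
          else if flg == -1 || flg == -2 then rb :: sub else sub
        pvALoop flg li sub' (chk.set j 1) 0
      else pvALoop flg li sub chk (j + 1)
    else if sv == rb then
      if flg == 2 || flg == -2 then
        if chk.getD j 1 == 0 || chk.getD j 1 == -1 then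
          let sub' := if flg == 2 then sub ++ [ra]
            else if flg == -2 then ra :: sub else sub
          pvALoop flg li sub' (chk.set j 1) 0
        else pvALoop flg li sub chk (j + 1)
      else
        if chk.getD j 1 == -1 then
          let sub' := if flg == 1 then sub ++ [ra]
            else if flg == -1 then ra :: sub else sub
          pvALoop flg li sub' (chk.set j 1) 0
        else pvALoop flg li sub chk (j + 1)
    else pvALoop flg li sub chk (j + 1)
  else (sub, li, chk)
termination_by (chk.countP pvChkP, li.length - j)
decreasing_by
  all_goals first
    | (apply Prod.Lex.left; apply pvCountP_set_lt; simp_all [pvChkP])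
    | (apply Prod.Lex.right; omega)

def inter_conn (sub : List Int) (li : List (List Int)) (chk : List Int) (flg : Int) :
    List Int × List (List Int) × List Int :=
  pvALoop flg li sub chk 0

-- ===== PORT B =====
-- cand: dict from endpoint value to the ascending list of edge indices touching it
def pvBuildStep (li : List (List Int)) (a b : Int) (d : PySem.Dict Int (List Nat)) (j : Nat) :
    PySem.Dict Int (List Nat) :=
  let e := li.getD j []
  let ka := PySem.List.pyGetD e a 0
  let kb := PySem.List.pyGetD e b 0
  let d1 := d.insert ka (d.getD ka [] ++ [j])           -- cand.setdefault(e[a], []).append(j)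
  if kb ≠ ka then d1.insert kb (d1.getD kb [] ++ [j]) else d1

def pvBuild (li : List (List Int)) (a b : Int) : PySem.Dict Int (List Nat) :=
  (List.range li.length).foldl (pvBuildStep li a b) PySem.Dict.empty

-- the for-loop over cand.get(v, []): first usable candidate and the endpoint it contributes
def pvFind (flg : Int) (li : List (List Int)) (chk : List Int) (a b v : Int) :
    List Nat → Option (Nat × Int)
  | [] => none
  | j :: rest =>
    let e := li.getD j []
    if PySem.List.pyGetD e a 0 == v then
      if chk.getD j 1 == 0 || chk.getD j 1 == -1 then some (j, PySem.List.pyGetD e b 0)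
      else pvFind flg li chk a b v rest
    else
      if (if flg == 2 || flg == -2 then chk.getD j 1 == 0 || chk.getD j 1 == -1
          else chk.getD j 1 == -1) then
        some (j, PySem.List.pyGetD e a 0)
      else pvFind flg li chk a b v rest

-- cited by pvBLoop's decreasing_by: a hit always sits on an eligible chk cell
theorem pvFind_some_chk (flg : Int) (li : List (List Int)) (chk : List Int) (a b v : Int)
    (l : List Nat) (j : Nat) (w : Int) (h : pvFind flg li chk a b v l = some (j, w)) :
    pvChkP (chk.getD j 1) = true := by
  induction l with
  | nil => simp [pvFind] at h
  | cons x rest ih =>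
    rw [pvFind] at h
    by_cases h1 : (PySem.List.pyGetD (li.getD x []) a 0 == v) = true
    · rw [if_pos h1] at h
      by_cases h2 : (chk.getD x 1 == 0 || chk.getD x 1 == -1) = true
      · rw [if_pos h2] at h
        simp only [Option.some.injEq, Prod.mk.injEq] at h
        obtain ⟨rfl, -⟩ := h
        simpa [pvChkP] using h2
      · rw [if_neg h2] at h; exact ih h
    · rw [if_neg h1] at h
      by_cases h2 : (if (flg == 2 || flg == -2) = true then chk.getD x 1 == 0 || chk.getD x 1 == -1
          else chk.getD x 1 == -1) = true
      · rw [if_pos h2] at h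
        simp only [Option.some.injEq, Prod.mk.injEq] at h
        obtain ⟨rfl, -⟩ := h
        by_cases hf : (flg == 2 || flg == -2) = true
        · rw [if_pos hf] at h2; simpa [pvChkP] using h2
        · rw [if_neg hf] at h2; simp [pvChkP]; simp at h2; omega
      · rw [if_neg h2] at h; exact ih h

def pvBLoop (flg : Int) (li : List (List Int)) (a b : Int) (cand : PySem.Dict Int (List Nat))
    (sub : List Int) (chk : List Int) : List Int × List (List Int) × List Int :=
  let v : Int :=
    if flg == 1 || flg == 2 then PySem.List.pyGetD sub ((sub.length : Int) - 1) 0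
    else if flg == -1 || flg == -2 then PySem.List.pyGetD sub 0 0
    else PySem.List.pyGetD sub (-1) 0
  match h : pvFind flg li chk a b v (cand.getD v []) with
  | none => (sub, li, chk)
  | some (j, w) =>
    let chk' := chk.set j 1
    let sub' := if flg == 1 || flg == 2 then sub ++ [w]
      else if flg == -1 || flg == -2 then w :: sub else sub
    pvBLoop flg li a b cand sub' chk'
termination_by chk.countP pvChkP
decreasing_by exact pvCountP_set_lt chk j (pvFind_some_chk flg li chk a b v _ j w h)

def inter_conn_alt (sub : List Int) (li : List (List Int)) (chk : List Int) (flg : Int) :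
    List Int × List (List Int) × List Int :=
  if li = [] then (sub, li, chk)        -- Source B: if not li: return sub, li, chk
  else
    let ab : Int × Int :=
      if flg == 1 || flg == 2 then (0, 1)
      else if flg == -1 || flg == -2 then (1, 0)
      else (-1, -1)
    pvBLoop flg li ab.1 ab.2 (pvBuild li ab.1 ab.2) sub chk

-- ===== PRECONDITION & SPEC =====
-- Pre_ excludes the inputs where Python A raises an IndexError: empty sub with edges present,
-- rows shorter than the indices flg selects (A returns on a few of these when every row matches
-- ineligibly, but B's one-pass index build must read both endpoints of every row), and edges
-- beyond chk's length whose endpoint values could ever equal the evolving path endpoint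
-- (over-approximated by value membership in sub or in the first len(chk) rows; on the
-- over-approximated no-match cases both programs return the same value).
def Pre_inter_conn (sub : List Int) (li : List (List Int)) (chk : List Int) (flg : Int) : Prop :=
  (sub = [] → li = []) ∧
  (if flg = 1 ∨ flg = 2 ∨ flg = -1 ∨ flg = -2 then ∀ r ∈ li, 2 ≤ r.length
   else ∀ r ∈ li, r ≠ []) ∧
  (li.length ≤ chk.length ∨
   ∀ r ∈ li.drop chk.length, ∀ x ∈ r, x ∉ sub ∧ ∀ r' ∈ li.take chk.length, x ∉ r')
instance (sub : List Int) (li : List (List Int)) (chk : List Int) (flg : Int) :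
    Decidable (Pre_inter_conn sub li chk flg) := by unfold Pre_inter_conn; infer_instance

def pvWitness_inter_conn : List Int × List (List Int) × List Int × Int :=
  ([0], [[0, 1], [1, 2]], [0, 0], 1)

def Spec_inter_conn (sub : List Int) (li : List (List Int)) (chk : List Int) (flg : Int) (out : List Int × List (List Int) × List Int) : Prop := out = inter_conn_alt sub li chk flg
instance (sub : List Int) (li : List (List Int)) (chk : List Int) (flg : Int) (out : List Int × List (List Int) × List Int) : Decidable (Spec_inter_conn sub li chk flg out) := by unfold Spec_inter_conn; infer_instance

-- ===== CLAIM (what is proved, stated in full; the proofs are below) =====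
def Claim_equal_inter_conn : Prop := ∀ (sub : List Int) (li : List (List Int)) (chk : List Int) (flg : Int), Dom_inter_conn sub li chk flg → Pre_inter_conn sub li chk flg → Spec_inter_conn sub li chk flg (inter_conn sub li chk flg)

-- ===== LEMMAS AND PROOFS =====

-- proof-level vocabulary: the current endpoint, the per-index hit test, the contributed value,
-- the new path, and the per-index membership test of cand
def pvV (flg : Int) (sub : List Int) : Int :=
  if flg == 1 || flg == 2 then PySem.List.pyGetD sub ((sub.length : Int) - 1) 0
  else if flg == -1 || flg == -2 then PySem.List.pyGetD sub 0 0
  else PySem.List.pyGetD sub (-1) 0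

def pvHit (flg : Int) (li : List (List Int)) (chk : List Int) (a b v : Int) (j : Nat) : Bool :=
  if PySem.List.pyGetD (li.getD j []) a 0 == v then
    chk.getD j 1 == 0 || chk.getD j 1 == -1
  else if PySem.List.pyGetD (li.getD j []) b 0 == v then
    (if flg == 2 || flg == -2 then chk.getD j 1 == 0 || chk.getD j 1 == -1
     else chk.getD j 1 == -1)
  else false

def pvW (li : List (List Int)) (a b v : Int) (j : Nat) : Int :=
  let e := li.getD j []
  if PySem.List.pyGetD e a 0 == v then PySem.List.pyGetD e b 0 else PySem.List.pyGetD e a 0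

def pvApply (flg : Int) (sub : List Int) (w : Int) : List Int :=
  if flg == 1 || flg == 2 then sub ++ [w]
  else if flg == -1 || flg == -2 then w :: sub
  else sub

def pvMatchB (li : List (List Int)) (a b v : Int) (j : Nat) : Bool :=
  PySem.List.pyGetD (li.getD j []) a 0 == v || PySem.List.pyGetD (li.getD j []) b 0 == v

def pvAB (flg : Int) : Int × Int :=
  if flg == 1 || flg == 2 then (0, 1)
  else if flg == -1 || flg == -2 then (1, 0)
  else (-1, -1)

theorem pvHit_chk (flg : Int) (li : List (List Int)) (chk : List Int) (a b v : Int) (j : Nat)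
    (h : pvHit flg li chk a b v j = true) : pvChkP (chk.getD j 1) = true := by
  unfold pvHit at h
  split_ifs at h <;> simp_all [pvChkP]

theorem pvHit_match (flg : Int) (li : List (List Int)) (chk : List Int) (a b v : Int) (j : Nat)
    (h : pvHit flg li chk a b v j = true) : pvMatchB li a b v j = true := by
  unfold pvHit at h
  unfold pvMatchB
  split_ifs at h <;> simp_all

-- one unfolding of A's loop body in the pvHit vocabulary
theorem pvALoop_step (flg : Int) (li : List (List Int)) (sub chk : List Int) (j : Nat)
    (hj : j < li.length) :
    pvALoop flg li sub chk j =
      if pvHit flg li chk (pvAB flg).1 (pvAB flg).2 (pvV flg sub) j then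
        pvALoop flg li (pvApply flg sub (pvW li (pvAB flg).1 (pvAB flg).2 (pvV flg sub) j))
          (chk.set j 1) 0
      else pvALoop flg li sub chk (j + 1) := by
  rw [pvALoop, dif_pos hj]
  simp only [pvAB, pvV, pvHit, pvW, pvApply, beq_iff_eq, Bool.or_eq_true]
  split_ifs <;> first | rfl | simp_all

-- A's whole scan from index j is "find the first hit, apply it, restart"
theorem pvALoop_eq_find (flg : Int) (li : List (List Int)) (sub chk : List Int)
    (n j : Nat) (hn : li.length - j = n) :
    pvALoop flg li sub chk j =
      match (List.range' j n).find? (pvHit flg li chk (pvAB flg).1 (pvAB flg).2 (pvV flg sub)) with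
      | none => (sub, li, chk)
      | some k =>
          pvALoop flg li (pvApply flg sub (pvW li (pvAB flg).1 (pvAB flg).2 (pvV flg sub) k))
            (chk.set k 1) 0 := by
  induction n generalizing j with
  | zero =>
    have hnj : ¬ j < li.length := by omega
    rw [pvALoop, dif_neg hnj]
    simp [List.range']
  | succ n ih =>
    have hj : j < li.length := by omega
    rw [pvALoop_step flg li sub chk j hj, List.range'_succ]
    by_cases hh : pvHit flg li chk (pvAB flg).1 (pvAB flg).2 (pvV flg sub) j = true
    · rw [if_pos hh]
      simp only [List.find?_cons, hh]
    · rw [if_neg hh]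
      have hf : pvHit flg li chk (pvAB flg).1 (pvAB flg).2 (pvV flg sub) j = false := by
        simpa using hh
      simp only [List.find?_cons, hf]
      exact ih (j + 1) (by omega)

-- the dict built by B holds, at key v, exactly the ascending matching indices
theorem pvBuild_getD (li : List (List Int)) (a b v : Int) :
    (pvBuild li a b).getD v [] = (List.range li.length).filter (pvMatchB li a b v) := by
  unfold pvBuild
  induction li.length with
  | zero => simp [PySem.Dict.getD_empty]
  | succ n ih =>
    rw [List.range_succ, List.foldl_append, List.foldl_cons, List.foldl_nil, List.filter_append,
      List.filter_cons, List.filter_nil]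
    simp only [pvBuildStep]
    by_cases hba : PySem.List.pyGetD (li.getD n []) b 0 ≠ PySem.List.pyGetD (li.getD n []) a 0
    · rw [if_pos hba, PySem.Dict.getD_insert]
      by_cases hvb : v = PySem.List.pyGetD (li.getD n []) b 0
      · subst hvb
        rw [if_pos rfl, PySem.Dict.getD_insert, if_neg hba, ih]
        have hmB : pvMatchB li a b (PySem.List.pyGetD (li.getD n []) b 0) n = true := by
          simp [pvMatchB]
        simp only [List.getD] at hmB
        simp [hmB]
      · rw [if_neg hvb, PySem.Dict.getD_insert]
        by_cases hva : v = PySem.List.pyGetD (li.getD n []) a 0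
        · subst hva
          rw [if_pos rfl, ih]
          have hmB : pvMatchB li a b (PySem.List.pyGetD (li.getD n []) a 0) n = true := by
            simp [pvMatchB]
          simp only [List.getD] at hmB
          simp [hmB]
        · rw [if_neg hva, ih]
          have hmB : pvMatchB li a b v n = false := by
            simp only [pvMatchB, Bool.or_eq_false_iff, beq_eq_false_iff_ne]
            exact ⟨Ne.symm hva, Ne.symm hvb⟩
          simp [hmB]
    · rw [if_neg hba]
      push Not at hba
      rw [PySem.Dict.getD_insert]
      by_cases hva : v = PySem.List.pyGetD (li.getD n []) a 0
      · subst hva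
        rw [if_pos rfl, ih]
        have hmB : pvMatchB li a b (PySem.List.pyGetD (li.getD n []) a 0) n = true := by
          simp [pvMatchB]
        simp only [List.getD] at hmB
        simp [hmB]
      · rw [if_neg hva, ih]
        have hmB : pvMatchB li a b v n = false := by
          simp only [pvMatchB, Bool.or_eq_false_iff, beq_eq_false_iff_ne]
          exact ⟨Ne.symm hva, hba ▸ Ne.symm hva⟩
        simp [hmB]

-- B's candidate scan over the matching indices is A's first hit over all indices
theorem pvFind_filter (flg : Int) (li : List (List Int)) (chk : List Int) (a b v : Int)
    (l : List Nat) :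
    pvFind flg li chk a b v (l.filter (pvMatchB li a b v)) =
      (l.find? (pvHit flg li chk a b v)).map (fun j => (j, pvW li a b v j)) := by
  induction l with
  | nil => simp [pvFind]
  | cons x rest ih =>
    by_cases hm : pvMatchB li a b v x = true
    · rw [List.filter_cons_of_pos hm, pvFind]
      by_cases h1 : (PySem.List.pyGetD (li.getD x []) a 0 == v) = true
      · rw [if_pos h1]
        by_cases h2 : (chk.getD x 1 == 0 || chk.getD x 1 == -1) = true
        · have hhit : pvHit flg li chk a b v x = true := by
            unfold pvHit; rw [if_pos h1]; exact h2
          rw [if_pos h2]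
          simp only [List.find?_cons, hhit]
          have h1' : PySem.List.pyGetD (li.getD x []) a 0 = v := by simpa using h1
          simp only [List.getD] at h1'
          simp [pvW, List.getD, h1']
        · have hhit : pvHit flg li chk a b v x = false := by
            unfold pvHit; rw [if_pos h1]; exact Bool.eq_false_iff.mpr h2
          rw [if_neg h2]
          simp only [List.find?_cons, hhit]
          exact ih
      · rw [if_neg h1]
        have hb : (PySem.List.pyGetD (li.getD x []) b 0 == v) = true := by
          unfold pvMatchB at hm; rcases Bool.or_eq_true_iff.mp hm with h | h
          · exact absurd h h1
          · exact h
        by_cases h2 : (if (flg == 2 || flg == -2) = true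
            then chk.getD x 1 == 0 || chk.getD x 1 == -1 else chk.getD x 1 == -1) = true
        · have hhit : pvHit flg li chk a b v x = true := by
            unfold pvHit; rw [if_neg h1, if_pos hb]; exact h2
          rw [if_pos h2]
          simp only [List.find?_cons, hhit]
          have h1' : ¬ PySem.List.pyGetD (li.getD x []) a 0 = v := by simpa using h1
          simp only [List.getD] at h1'
          simp [pvW, List.getD, h1']
        · have hhit : pvHit flg li chk a b v x = false := by
            unfold pvHit; rw [if_neg h1, if_pos hb]; exact Bool.eq_false_iff.mpr h2
          rw [if_neg h2]
          simp only [List.find?_cons, hhit]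
          exact ih
    · rw [List.filter_cons_of_neg (by simpa using hm)]
      have hhit : pvHit flg li chk a b v x = false := by
        cases hx : pvHit flg li chk a b v x
        · rfl
        · exact absurd (pvHit_match flg li chk a b v x hx) (by simpa using hm)
      simp only [List.find?_cons, hhit]
      exact ih

theorem pvBLoop_step (flg : Int) (li : List (List Int)) (a b : Int)
    (cand : PySem.Dict Int (List Nat)) (sub chk : List Int) :
    pvBLoop flg li a b cand sub chk =
      match pvFind flg li chk a b (pvV flg sub) (cand.getD (pvV flg sub) []) with
      | none => (sub, li, chk)
      | some (j, w) => pvBLoop flg li a b cand (pvApply flg sub w) (chk.set j 1) := by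
  rw [pvBLoop]
  simp only [pvV, pvApply]
  split <;> rename_i h
  · rw [h]
  · rw [h]

theorem pvLoop_main (flg : Int) (li : List (List Int)) :
    ∀ n chk sub, chk.countP pvChkP = n →
      pvALoop flg li sub chk 0 =
        pvBLoop flg li (pvAB flg).1 (pvAB flg).2 (pvBuild li (pvAB flg).1 (pvAB flg).2) sub chk := by
  intro n
  induction n using Nat.strong_induction_on with
  | _ n IH =>
    intro chk sub hcnt
    rw [pvALoop_eq_find flg li sub chk li.length 0 (by omega), pvBLoop_step,
      pvBuild_getD, pvFind_filter, ← List.range_eq_range']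
    cases hfind : (List.range li.length).find? (pvHit flg li chk (pvAB flg).1 (pvAB flg).2 (pvV flg sub)) with
    | none => simp
    | some k =>
      simp only [Option.map_some]
      have hhit : pvHit flg li chk (pvAB flg).1 (pvAB flg).2 (pvV flg sub) k = true :=
        List.find?_some hfind
      exact IH _ (hcnt ▸ pvCountP_set_lt chk k (pvHit_chk _ _ _ _ _ _ _ hhit)) _ _ rfl

-- ===== VERDICT (by name: the statement is the Claim_ definition above) =====
theorem inter_conn_spec : Claim_equal_inter_conn := by
  intro sub li chk flg _ _
  show inter_conn sub li chk flg = inter_conn_alt sub li chk flg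
  unfold inter_conn inter_conn_alt
  by_cases hli : li = []
  · subst hli
    rw [if_pos rfl, pvALoop]
    simp
  · rw [if_neg hli]
    exact pvLoop_main flg li (chk.countP pvChkP) chk sub rfl
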